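-- pv_equiv track=rewrite | github.com/Bennyhwanggggg/LumiCube | scroll_text.py | split_into_8x8_arrays
-- ===== SOURCE A (Python) =====
-- def split_into_8x8_arrays(array):
--     # Split the 2D array into lists of 8x8 arrays
--     result = []
--     num_columns = len(array[0])
--     num_slices = (num_columns + 7) // 8  # Ceiling division to get the number of slices needed
--     for i in range(num_slices):
--         start_column = i * 8
--         end_column = min((i + 1) * 8, len(array[0]))
--         slice_arrays = []
--         for row in array:
--             slice_arrays.append(row[start_column:end_column])
--         result.append(slice_arrays)
--     return result
-- ===== SOURCE B (Python) =====
-- def split_into_8x8_arrays(array):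
--     # Row-major table of per-row fragments, then transpose to regroup by slice.
--     num_columns = len(array[0])
--     table = [[row[s:min(s + 8, num_columns)] for s in range(0, num_columns, 8)]
--              for row in array]
--     return [list(group) for group in zip(*table)]
-- ===== Notes on version B (the rewrite author's own statement) =====
-- stated objective: alternative
-- what changed: B builds a row-major table of each row's 8-wide fragments in one pass over the rows and then transposes it with zip(*table), instead of A's column-slice-first nested loops that rescan all rows once per slice.
import Mathlib
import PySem

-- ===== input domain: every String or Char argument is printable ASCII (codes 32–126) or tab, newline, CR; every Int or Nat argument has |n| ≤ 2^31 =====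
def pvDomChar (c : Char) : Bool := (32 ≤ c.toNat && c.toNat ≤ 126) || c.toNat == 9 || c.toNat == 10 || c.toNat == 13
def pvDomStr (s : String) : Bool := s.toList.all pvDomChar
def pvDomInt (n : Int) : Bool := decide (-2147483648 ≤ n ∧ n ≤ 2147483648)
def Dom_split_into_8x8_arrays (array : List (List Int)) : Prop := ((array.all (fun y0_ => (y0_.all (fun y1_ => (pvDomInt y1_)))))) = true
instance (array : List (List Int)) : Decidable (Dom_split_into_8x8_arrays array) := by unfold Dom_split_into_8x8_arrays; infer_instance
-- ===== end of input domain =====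

-- B builds a row-major table of per-row fragments and transposes it (alternative decomposition, same cost).

-- ===== PORT A =====
-- column-wise: for each slice index i, collect row[i*8 : min((i+1)*8, len(array[0]))] over all rows
def split_into_8x8_arrays (array : List (List Int)) : List (List (List Int)) :=
  -- array[0] raises IndexError on []; Pre_ excludes the empty array, headD is only a totalizer
  let num_columns : Int := ((array.headD []).length : Int)
  let num_slices : Int := PySem.Int.floordiv (num_columns + 7) 8
  (PySem.List.pyRange 0 num_slices 1).foldl
    (fun result i =>
      let start_column := i * 8
      let end_column := min ((i + 1) * 8) num_columns
      let slice_arrays := array.foldl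
        (fun acc row => acc ++ [PySem.List.slice row (some start_column) (some end_column)]) []
      result ++ [slice_arrays]) []

-- ===== PORT B =====
-- zip(*table): repeatedly take the head of every row until some row is exhausted
def pyZipStar (t : List (List (List Int))) : List (List (List Int)) :=
  if _h : t = [] ∨ t.any (·.isEmpty) then []
  else
    (t.map (fun r => r.headD [])) :: pyZipStar (t.map (·.tail))
termination_by (t.headD []).length
decreasing_by
  rcases t with _ | ⟨a, as⟩
  · simp at _h
  · have ha : a ≠ [] := by
      intro hnil
      exact _h (Or.inr (by simp [hnil]))
    have hpos := List.length_pos_iff.mpr ha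
    simp [List.length_tail]
    omega

def split_into_8x8_arrays_alt (array : List (List Int)) : List (List (List Int)) :=
  let num_columns : Int := ((array.headD []).length : Int)
  let table := array.map (fun row =>
    (PySem.List.pyRange 0 num_columns 8).map
      (fun s => PySem.List.slice row (some s) (some (min (s + 8) num_columns))))
  pyZipStar table

-- ===== PRECONDITION & SPEC =====
-- Pre_ excludes only the empty outer list, on which the Python A raises IndexError at array[0].
def Pre_split_into_8x8_arrays (array : List (List Int)) : Prop := array ≠ []
instance (array : List (List Int)) : Decidable (Pre_split_into_8x8_arrays array) := by unfold Pre_split_into_8x8_arrays; infer_instance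
def pvWitness_split_into_8x8_arrays : List (List Int) := [[1,2,3,4,5,6,7,8,9], [9,8,7,6,5,4,3,2,1]]

def Spec_split_into_8x8_arrays (array : List (List Int)) (out : List (List (List Int))) : Prop := out = split_into_8x8_arrays_alt array
instance (array : List (List Int)) (out : List (List (List Int))) : Decidable (Spec_split_into_8x8_arrays array out) := by unfold Spec_split_into_8x8_arrays; infer_instance

-- ===== CLAIM (what is proved, stated in full; the proofs are below) =====
def Claim_equal_split_into_8x8_arrays : Prop := ∀ (array : List (List Int)), Dom_split_into_8x8_arrays array → Pre_split_into_8x8_arrays array → Spec_split_into_8x8_arrays array (split_into_8x8_arrays array)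

-- ===== LEMMAS AND PROOFS =====

theorem foldl_append_map {α β : Type} (f : α → β) (l : List α) (init : List β) :
    l.foldl (fun acc x => acc ++ [f x]) init = init ++ l.map f := by
  induction l generalizing init with
  | nil => simp
  | cons a l ih => simp [ih]

-- zip(*table) of a rectangular table built by mapping a fragment list over every row
theorem pyZipStar_rect {ρ κ : Type} (rows : List ρ) (hrows : rows ≠ [])
    (ks : List κ) (g : ρ → κ → List Int) :
    pyZipStar (rows.map (fun r => ks.map (g r))) = ks.map (fun k => rows.map (fun r => g r k)) := by
  induction ks with
  | nil =>
    rw [pyZipStar]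
    rcases rows with _ | ⟨a, as⟩
    · exact absurd rfl hrows
    · simp
  | cons k ks ih =>
    rw [pyZipStar]
    rw [dif_neg (by simp [hrows])]
    simp only [List.map_map, Function.comp_def, List.map_cons, List.headD_cons, List.tail_cons]
    rw [ih]

theorem split_into_8x8_arrays_eq_canon (array : List (List Int)) :
    split_into_8x8_arrays array =
      (List.range (((array.headD []).length + 7) / 8)).map
        (fun (j : Nat) => array.map (fun row =>
          PySem.List.slice row (some ((j : Int) * 8))
            (some (min ((j : Int) * 8 + 8) ((array.headD []).length : Int))))) := by
  simp only [split_into_8x8_arrays]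
  set nc : Nat := (array.headD []).length with hnc
  have h1 : ((nc : Int) + 7) = ((nc + 7 : Nat) : Int) := by push_cast; ring
  have h2 : PySem.Int.floordiv ((nc : Int) + 7) 8 = (((nc + 7) / 8 : Nat) : Int) := by
    rw [h1]; exact_mod_cast PySem.Int.floordiv_natCast (nc + 7) 8
  simp only [h2, PySem.List.pyRange_one, Int.sub_zero, Int.toNat_natCast]
  rw [foldl_append_map]
  simp only [List.nil_append, List.map_map, Function.comp_def]
  apply List.map_congr_left
  intro j _
  rw [foldl_append_map]
  simp only [List.nil_append]
  apply List.map_congr_left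
  intro row _
  have e1 : ((0 : Int) + (j : Int)) * 8 = (j : Int) * 8 := by ring
  have e2 : ((0 : Int) + (j : Int) + 1) * 8 = (j : Int) * 8 + 8 := by ring
  rw [e1, e2]

theorem split_into_8x8_arrays_alt_eq_canon (array : List (List Int)) (h : array ≠ []) :
    split_into_8x8_arrays_alt array =
      (List.range (((array.headD []).length + 7) / 8)).map
        (fun (j : Nat) => array.map (fun row =>
          PySem.List.slice row (some ((j : Int) * 8))
            (some (min ((j : Int) * 8 + 8) ((array.headD []).length : Int))))) := by
  simp only [split_into_8x8_arrays_alt]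
  set nc : Nat := (array.headD []).length with hnc
  have hr : PySem.List.pyRange 0 (nc : Int) 8 =
      (List.range ((nc + 7) / 8)).map (fun (j : Nat) => ((j : Int) * 8)) := by
    rw [PySem.List.pyRange_of_pos 0 (nc : Int) (by norm_num)]
    have hcnt : (if (0 : Int) < (nc : Int) then (((nc : Int) - 0 + 8 - 1) / 8).toNat else 0)
        = (nc + 7) / 8 := by
      by_cases hpos : 0 < nc
      · rw [if_pos (by exact_mod_cast hpos)]
        omega
      · have h0 : nc = 0 := by omega
        simp [h0]
    rw [hcnt]
    apply List.map_congr_left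
    intro j _
    ring
  rw [hr]
  simp only [List.map_map, Function.comp_def]
  rw [pyZipStar_rect array h (List.range ((nc + 7) / 8))
    (fun row j => PySem.List.slice row (some ((j : Int) * 8))
      (some (min (((j : Int) * 8) + 8) (nc : Int))))]

-- ===== VERDICT (by name: the statement is the Claim_ definition above) =====
theorem split_into_8x8_arrays_spec : Claim_equal_split_into_8x8_arrays := by
  intro array _ hpre
  unfold Spec_split_into_8x8_arrays
  rw [split_into_8x8_arrays_eq_canon, split_into_8x8_arrays_alt_eq_canon array hpre]
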